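-- pv_equiv track=rewrite | github.com/seng499-bratwurst/rift | ChromaDB/src/scripts/confluence2Markdown.py | clean_table_markdown
-- ===== SOURCE A (Python) =====
-- def clean_table_markdown(markdown):
--     """Clean and format table markdown."""
--     lines = markdown.split('\n')
--     cleaned_lines = []
--     in_table = False
--     table_lines = []
--
--     for line in lines:
--         if line.strip().startswith('|'):
--             if not in_table:
--                 in_table = True
--                 # Add table header if not present
--                 if not any('---' in l for l in table_lines):
--                     headers = [h.strip() for h in line.strip('|').split('|')]
--                     table_lines.append('| ' + ' | '.join(headers) + ' |')
--                     table_lines.append('|' + '|'.join(['---' for _ in headers]) + '|')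
--             table_lines.append(line)
--         else:
--             if in_table:
--                 # Process collected table lines
--                 if table_lines:
--                     # Ensure proper spacing in table cells
--                     cleaned_table = []
--                     for table_line in table_lines:
--                         cells = [cell.strip() for cell in table_line.strip('|').split('|')]
--                         cleaned_table.append('| ' + ' | '.join(cells) + ' |')
--                     cleaned_lines.extend(cleaned_table)
--                     cleaned_lines.append('')  # Add blank line after table
--                 table_lines = []
--                 in_table = False
--             cleaned_lines.append(line)
--
--     # Handle any remaining table lines
--     if table_lines:
--         cleaned_table = []
--         for table_line in table_lines:
--             cells = [cell.strip() for cell in table_line.strip('|').split('|')]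
--             cleaned_table.append('| ' + ' | '.join(cells) + ' |')
--         cleaned_lines.extend(cleaned_table)
--
--     return '\n'.join(cleaned_lines)
-- ===== SOURCE B (Python) =====
-- from itertools import groupby
--
--
-- def _reformat(line):
--     cells = [cell.strip() for cell in line.strip('|').split('|')]
--     return '| ' + ' | '.join(cells) + ' |'
--
--
-- def clean_table_markdown(markdown):
--     """Clean and format table markdown."""
--     groups = [(k, list(g)) for k, g in
--               groupby(markdown.split('\n'), key=lambda l: l.strip().startswith('|'))]
--     out = []
--     for i, (is_table, run) in enumerate(groups):
--         if not is_table: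
--             out.extend(run)
--         else:
--             headers = [h.strip() for h in run[0].strip('|').split('|')]
--             header = '| ' + ' | '.join(headers) + ' |'
--             sep = '|' + '|'.join(['---' for _ in headers]) + '|'
--             out.extend(_reformat(l) for l in [header, sep] + run)
--             if i != len(groups) - 1:
--                 out.append('')
--     return '\n'.join(out)
-- ===== Notes on version B (the rewrite author's own statement) =====
-- stated objective: alternative
-- what changed: B splits the input into lines, groups them into maximal consecutive runs of table/non-table lines with itertools.groupby, and formats each table run in one shot (synthesized header + separator + cleaned rows + conditional trailing blank), replacing A's line-by-line state machine with in_table flag and table_lines accumulator.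
import Mathlib
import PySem

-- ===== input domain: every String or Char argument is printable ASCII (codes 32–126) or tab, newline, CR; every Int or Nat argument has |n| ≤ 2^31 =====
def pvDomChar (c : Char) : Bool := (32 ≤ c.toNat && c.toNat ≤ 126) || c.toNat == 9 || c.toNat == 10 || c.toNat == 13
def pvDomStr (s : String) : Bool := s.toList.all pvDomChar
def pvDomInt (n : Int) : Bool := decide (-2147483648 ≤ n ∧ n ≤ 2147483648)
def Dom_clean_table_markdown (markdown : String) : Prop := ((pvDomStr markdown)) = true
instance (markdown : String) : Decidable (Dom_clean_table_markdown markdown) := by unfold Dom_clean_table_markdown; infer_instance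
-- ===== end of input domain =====

-- B regroups the lines into consecutive runs (itertools.groupby) and formats each run in one
-- pass, instead of A's stateful line-by-line accumulator; objective: alternative decomposition.


-- ===== PORT A =====

-- line.strip().startswith('|')
def pvTab (l : String) : Bool := PySem.Str.startswith (PySem.Str.strip l) "|"

-- '| ' + ' | '.join(cell.strip() for cell in line.strip('|').split('|')) + ' |'
def pvSplitBar (s : String) : List String :=
  (PySem.Chars.splitOn (PySem.Str.stripChars s "|").toList "|".toList).map String.ofList

def pvClean (tl : String) : String :=
  "| " ++ PySem.Str.join " | " ((pvSplitBar tl).map PySem.Str.strip) ++ " |"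

-- headers = [h.strip() for h in line.strip('|').split('|')]
def pvHeaders (l : String) : List String :=
  (pvSplitBar l).map PySem.Str.strip

def pvHdr (l : String) : String := "| " ++ PySem.Str.join " | " (pvHeaders l) ++ " |"

def pvSep (l : String) : String := "|" ++ PySem.Str.join "|" ((pvHeaders l).map (fun _ => "---")) ++ "|"

-- A's for-loop over lines, state = (cleaned_lines, in_table, table_lines); the trailing
-- 'if table_lines:' flush is the [] case.
def pvALoop : List String → List String → Bool → List String → List String
  | [], cl, _, ts => cl ++ (if ts.isEmpty then [] else ts.map pvClean)
  | l :: ls, cl, inT, ts =>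
    if pvTab l then
      let ts' :=
        if !inT then
          (if !(ts.any (fun t => PySem.Str.isIn "---" t)) then ts ++ [pvHdr l, pvSep l] else ts)
        else ts
      pvALoop ls cl true (ts' ++ [l])
    else
      if inT then
        let cl' := if ts.isEmpty then cl else cl ++ ts.map pvClean ++ [""]
        pvALoop ls (cl' ++ [l]) false []
      else
        pvALoop ls (cl ++ [l]) false ts

def clean_table_markdown (markdown : String) : String :=
  PySem.Str.join "\n" (pvALoop ((PySem.Chars.splitOn markdown.toList "\n".toList).map String.ofList) [] false [])

-- ===== PORT B =====

-- groupby(lines, key=is-table-line): each iteration handles one maximal run.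
def pvBGo : List String → List String
  | [] => []
  | l :: ls =>
    if pvTab l then
      let run := l :: ls.takeWhile pvTab
      let rest := ls.dropWhile pvTab
      (pvHdr l :: pvSep l :: run).map pvClean ++ (if rest.isEmpty then [] else [""]) ++ pvBGo rest
    else
      let rest := ls.dropWhile (fun x => !pvTab x)
      (l :: ls.takeWhile (fun x => !pvTab x)) ++ pvBGo rest
termination_by ls => ls.length
decreasing_by
  · exact Nat.lt_succ_of_le (List.length_dropWhile_le ..)
  · exact Nat.lt_succ_of_le (List.length_dropWhile_le ..)

def clean_table_markdown_alt (markdown : String) : String :=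
  PySem.Str.join "\n" (pvBGo ((PySem.Chars.splitOn markdown.toList "\n".toList).map String.ofList))

-- ===== PRECONDITION & SPEC =====
def Spec_clean_table_markdown (markdown : String) (out : String) : Prop := out = clean_table_markdown_alt markdown
instance (markdown : String) (out : String) : Decidable (Spec_clean_table_markdown markdown out) := by unfold Spec_clean_table_markdown; infer_instance

-- ===== CLAIM (what is proved, stated in full; the proofs are below) =====
def Claim_equal_clean_table_markdown : Prop := ∀ (markdown : String), Dom_clean_table_markdown markdown → Spec_clean_table_markdown markdown (clean_table_markdown markdown)

-- ===== LEMMAS AND PROOFS =====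

lemma pvBGo_cons_nontab (l : String) (ls : List String) (h : pvTab l = false) :
    pvBGo (l :: ls) = l :: pvBGo ls := by
  cases ls with
  | nil => simp [pvBGo, h]
  | cons x xs =>
    by_cases hx : pvTab x
    · simp [pvBGo, h, hx]
    · rw [pvBGo, pvBGo]
      simp [h, hx]

-- A while inside a table run: it collects the run, then flushes and continues (or ends).
lemma pvAux (ls : List String) : ∀ (ts cl : List String), ts ≠ [] →
    pvALoop ls cl true ts =
      (match ls.dropWhile pvTab with
       | [] => cl ++ (ts ++ ls.takeWhile pvTab).map pvClean
       | l' :: ls' => pvALoop ls' (cl ++ (ts ++ ls.takeWhile pvTab).map pvClean ++ ["", l']) false []) := by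
  induction ls with
  | nil =>
    intro ts cl hts
    simp [pvALoop, List.isEmpty_iff, hts]
  | cons l ls ih =>
    intro ts cl hts
    by_cases h : pvTab l
    · rw [pvALoop]
      simp only [h, if_true, Bool.not_true, Bool.false_eq_true, if_false]
      rw [ih (ts ++ [l]) cl (by simp)]
      simp [h]
    · rw [pvALoop]
      simp only [h, Bool.false_eq_true, if_false, if_true, List.isEmpty_iff, List.takeWhile_cons,
        List.dropWhile_cons]
      simp [hts]

lemma pvMain : ∀ (n : ℕ) (ls cl : List String), ls.length ≤ n →
    pvALoop ls cl false [] = cl ++ pvBGo ls := by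
  intro n
  induction n with
  | zero =>
    intro ls cl hn
    have : ls = [] := List.length_eq_zero_iff.mp (Nat.le_zero.mp hn)
    subst this
    simp [pvALoop, pvBGo]
  | succ n ih =>
    intro ls cl hn
    cases ls with
    | nil => simp [pvALoop, pvBGo]
    | cons l ls =>
      by_cases h : pvTab l
      · rw [pvALoop]
        simp only [h, if_true, Bool.not_false, List.any_nil, if_true, List.nil_append]
        rw [pvAux ls ([pvHdr l, pvSep l] ++ [l]) cl (by simp)]
        cases hd : ls.dropWhile pvTab with
        | nil =>
          rw [pvBGo]
          simp [pvBGo, h, hd]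
        | cons l' ls' =>
          have hl' : pvTab l' = false := by
            have := List.head?_dropWhile_not pvTab ls
            rw [hd] at this
            simpa using this
          have hlen : ls'.length ≤ n := by
            have h1 : (l' :: ls').length ≤ ls.length := hd ▸ List.length_dropWhile_le ..
            simp at h1 hn; omega
          dsimp only
          rw [ih ls' _ hlen, pvBGo]
          simp [h, hd, pvBGo_cons_nontab l' ls' hl']
      · have h' : pvTab l = false := by simpa using h
        rw [pvALoop]
        simp only [h', Bool.false_eq_true, if_false]
        rw [ih ls (cl ++ [l]) (by simp at hn; omega)]
        rw [pvBGo_cons_nontab l ls h']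
        simp

-- ===== VERDICT (by name: the statement is the Claim_ definition above) =====
theorem clean_table_markdown_spec : Claim_equal_clean_table_markdown := by
  intro markdown _
  unfold Spec_clean_table_markdown clean_table_markdown clean_table_markdown_alt
  rw [pvMain ((PySem.Chars.splitOn markdown.toList "\n".toList).map String.ofList).length _ [] (le_refl _)]
  rfl
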